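-- pv_equiv track=rewrite | github.com/jano31415/codejam | codeforces/721_round_div2/probc.py | solve
-- ===== SOURCE A (Python) =====
-- def solve(N, numbers):
--     set_numbers = set(numbers)
--     if len(set_numbers) == N:
--         return 0
--     dyn = {d:0 for d in set_numbers}
--     tot = 0
--     for i,x in enumerate(numbers):
--         tmp = dyn[x]
--         tot += tmp * (N-i)
--         dyn[x] = tmp + (i+1)
--     return tot
-- ===== SOURCE B (Python) =====
-- def solve(N, numbers):
--     if len(set(numbers)) == N:
--         return 0
--     groups = {}
--     for i, x in enumerate(numbers):
--         groups.setdefault(x, []).append(i)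
--     tot = 0
--     for idxs in groups.values():
--         acc = 0
--         for i in idxs:
--             tot += acc * (N - i)
--             acc += i + 1
--     return tot
-- ===== Notes on version B (the rewrite author's own statement) =====
-- stated objective: alternative
-- what changed: Replaces A's single interleaved pass that threads per-value running accumulators through one dict with a two-phase group-by: first build an index table mapping each value to its list of positions, then total each value's group independently with a fresh accumulator.
import Mathlib
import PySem

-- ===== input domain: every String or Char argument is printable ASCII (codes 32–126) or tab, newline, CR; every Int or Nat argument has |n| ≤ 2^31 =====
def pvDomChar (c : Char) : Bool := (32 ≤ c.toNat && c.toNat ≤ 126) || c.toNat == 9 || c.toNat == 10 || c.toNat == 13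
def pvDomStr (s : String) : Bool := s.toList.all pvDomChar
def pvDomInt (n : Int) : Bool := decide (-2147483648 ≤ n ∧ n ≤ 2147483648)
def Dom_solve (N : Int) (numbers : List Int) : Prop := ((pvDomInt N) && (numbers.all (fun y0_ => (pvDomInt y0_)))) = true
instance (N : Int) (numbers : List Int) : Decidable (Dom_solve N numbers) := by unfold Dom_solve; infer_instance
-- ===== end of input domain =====

-- B replaces A's single interleaved position-order pass (per-value running accumulators in one dict)
-- by a two-phase group-by: build an index table value → list of positions, then accumulate each
-- group independently (objective: alternative decomposition, same O(n) cost).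

-- ===== PORT A =====
def solve (N : Int) (numbers : List Int) : Int :=
  let setNumbers : PySem.Set Int := PySem.Set.ofList numbers
  if PySem.Set.len setNumbers = N then 0
  else
    -- {d: 0 for d in set_numbers}: iterates the set, but the resulting dict's lookups do not
    -- depend on that order (every value is 0), so this is order-independent consumption.
    let dyn : PySem.Dict Int Int :=
      setNumbers.foldl (fun d v => d.insert v 0) PySem.Dict.empty
    -- dyn[x] never raises (every x ∈ numbers is a key of dyn), so getD is exact here.
    let r :=
      (PySem.List.enumerate numbers).foldl
        (fun (st : PySem.Dict Int Int × Int) p =>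
          let tmp := st.1.getD p.2 0
          (st.1.insert p.2 (tmp + (p.1 + 1)), st.2 + tmp * (N - p.1)))
        (dyn, 0)
    r.2

-- ===== PORT B =====
def solve_alt (N : Int) (numbers : List Int) : Int :=
  if PySem.Set.len (PySem.Set.ofList numbers) = N then 0
  else
    -- groups.setdefault(x, []).append(i)  ≡  groups[x] = groups.get(x, []) + [i]
    let groups : PySem.Dict Int (List Int) :=
      (PySem.List.enumerate numbers).foldl
        (fun g p => g.modify p.2 [] (fun l => l ++ [p.1])) PySem.Dict.empty
    groups.values.foldl
      (fun tot idxs =>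
        (idxs.foldl (fun (s : Int × Int) i => (s.1 + s.2 * (N - i), s.2 + (i + 1))) (tot, 0)).1)
      0

-- ===== PRECONDITION & SPEC =====
def Spec_solve (N : Int) (numbers : List Int) (out : Int) : Prop := out = solve_alt N numbers
instance (N : Int) (numbers : List Int) (out : Int) : Decidable (Spec_solve N numbers out) := by unfold Spec_solve; infer_instance

-- ===== CLAIM (what is proved, stated in full; the proofs are below) =====
def Claim_equal_solve : Prop := ∀ (N : Int) (numbers : List Int), Dom_solve N numbers → Spec_solve N numbers (solve N numbers)

-- ===== LEMMAS AND PROOFS =====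

-- the shared per-index accumulation step: tot += acc*(N-i); acc += i+1
def pvStep (N : Int) (s : Int × Int) (i : Int) : Int × Int := (s.1 + s.2 * (N - i), s.2 + (i + 1))

-- group total starting from accumulator a
def pvInner (N a : Int) (l : List Int) : Int := (l.foldl (pvStep N) (0, a)).1

-- A's loop with the dict abstracted to a function Int → Int
def pvLoopF (N : Int) : List (Int × Int) → (Int → Int) → Int → Int
  | [], _, t => t
  | p :: ps, m, t => pvLoopF N ps (fun v => if v = p.2 then m p.2 + (p.1 + 1) else m v) (t + m p.2 * (N - p.1))

-- positions of value v in an enumerated list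
def pvIdxs (v : Int) (ps : List (Int × Int)) : List Int := (ps.filter (fun p => p.2 == v)).map (·.1)

theorem pvStep_fst_offset (N : Int) (l : List Int) (s : Int × Int) :
    (l.foldl (pvStep N) s).1 = s.1 + (l.foldl (pvStep N) (0, s.2)).1 := by
  induction l generalizing s with
  | nil => simp
  | cons i l ih =>
      simp only [List.foldl_cons]
      rw [ih (pvStep N s i), ih (pvStep N (0, s.2) i)]
      simp [pvStep]; ring

theorem pvInner_nil (N a : Int) : pvInner N a [] = 0 := rfl

theorem pvInner_cons (N a i : Int) (l : List Int) :
    pvInner N a (i :: l) = a * (N - i) + pvInner N (a + (i + 1)) l := by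
  simp only [pvInner, List.foldl_cons]
  rw [pvStep_fst_offset]
  simp [pvStep]

theorem pvIdxs_cons (v i x : Int) (ps : List (Int × Int)) :
    pvIdxs v ((i, x) :: ps) = if x = v then i :: pvIdxs v ps else pvIdxs v ps := by
  simp only [pvIdxs, List.filter_cons]
  by_cases h : x = v <;> simp [h]

theorem pvIdxs_nil_of_not_mem (v : Int) (ps : List (Int × Int)) (h : v ∉ ps.map (·.2)) :
    pvIdxs v ps = [] := by
  simp only [pvIdxs, List.map_eq_nil_iff]
  refine List.filter_eq_nil_iff.mpr ?_
  intro p hp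
  simp only [beq_iff_eq]
  intro hv
  exact h (List.mem_map.mpr ⟨p, hp, hv⟩)

-- A's dict fold computes pvLoopF of the dict's lookup function
theorem pvDict_eq_loopF (N : Int) (ps : List (Int × Int)) (d : PySem.Dict Int Int) (t : Int) :
    (ps.foldl
      (fun (st : PySem.Dict Int Int × Int) p =>
        let tmp := st.1.getD p.2 0
        (st.1.insert p.2 (tmp + (p.1 + 1)), st.2 + tmp * (N - p.1)))
      (d, t)).2 = pvLoopF N ps (fun v => d.getD v 0) t := by
  induction ps generalizing d t with
  | nil => rfl
  | cons p ps ih =>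
      simp only [List.foldl_cons, pvLoopF]
      rw [ih]
      congr 1
      funext v
      rw [PySem.Dict.getD_insert]

theorem pvInitDict_getD (l : List Int) (d : PySem.Dict Int Int)
    (h : ∀ v, d.getD v 0 = 0) (v : Int) :
    (l.foldl (fun d v => d.insert v 0) d).getD v 0 = 0 := by
  induction l generalizing d with
  | nil => exact h v
  | cons x l ih =>
      simp only [List.foldl_cons]
      refine ih _ ?_
      intro w
      rw [PySem.Dict.getD_insert]
      split <;> simp [h]

-- main decomposition: interleaved accumulation = sum of independent group accumulations
theorem pvLoopF_eq_sum (N : Int) (ps : List (Int × Int)) (m : Int → Int) (t : Int) :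
    pvLoopF N ps m t = t + ∑ v ∈ (ps.map (·.2)).toFinset, pvInner N (m v) (pvIdxs v ps) := by
  induction ps generalizing m t with
  | nil => simp [pvLoopF]
  | cons p ps ih =>
      obtain ⟨i, x⟩ := p
      simp only [pvLoopF, List.map_cons, List.toFinset_cons]
      rw [ih]
      set S := (ps.map (·.2)).toFinset with hS
      have hfg : ∀ v, v ≠ x →
          pvInner N (m v) (pvIdxs v ((i, x) :: ps))
            = pvInner N (if v = x then m x + (i + 1) else m v) (pvIdxs v ps) := by
        intro v hv
        rw [pvIdxs_cons]
        simp [hv, Ne.symm hv]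
      have hfx : pvInner N (m x) (pvIdxs x ((i, x) :: ps)) =
          m x * (N - i) + pvInner N (if x = x then m x + (i + 1) else m x) (pvIdxs x ps) := by
        rw [pvIdxs_cons]
        simp [pvInner_cons]
      by_cases hx : x ∈ S
      · rw [Finset.insert_eq_self.mpr hx,
            ← Finset.add_sum_erase S (fun v => pvInner N (m v) (pvIdxs v ((i, x) :: ps))) hx,
            ← Finset.add_sum_erase S
              (fun v => pvInner N (if v = x then m x + (i + 1) else m v) (pvIdxs v ps)) hx]
        have hsum : ∑ v ∈ S.erase x, pvInner N (m v) (pvIdxs v ((i, x) :: ps))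
            = ∑ v ∈ S.erase x, pvInner N (if v = x then m x + (i + 1) else m v) (pvIdxs v ps) :=
          Finset.sum_congr rfl (fun v hv => hfg v (Finset.ne_of_mem_erase hv))
        rw [hsum, hfx]; ring
      · rw [Finset.sum_insert hx]
        have h1 : ∑ v ∈ S, pvInner N (m v) (pvIdxs v ((i, x) :: ps))
            = ∑ v ∈ S, pvInner N (if v = x then m x + (i + 1) else m v) (pvIdxs v ps) :=
          Finset.sum_congr rfl (fun v hv => hfg v (fun h => hx (h ▸ hv)))
        have h2 : pvIdxs x ps = [] :=
          pvIdxs_nil_of_not_mem x ps (fun hmem => hx (List.mem_toFinset.mpr hmem))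
        rw [h1, hfx, h2, pvInner_nil]; ring

-- B's group table: lookup is exactly the position list
theorem pvGroups_getD (numbers : List Int) (k : Int) :
    ((PySem.List.enumerate numbers).foldl
      (fun (g : PySem.Dict Int (List Int)) p => g.modify p.2 [] (fun l => l ++ [p.1]))
      PySem.Dict.empty).getD k [] = pvIdxs k (PySem.List.enumerate numbers) := by
  have hswap : (PySem.List.enumerate numbers).foldl
      (fun (g : PySem.Dict Int (List Int)) p => g.modify p.2 [] (fun l => l ++ [p.1]))
      PySem.Dict.empty
    = ((PySem.List.enumerate numbers).map (fun p => (p.2, p.1))).foldl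
      (fun (g : PySem.Dict Int (List Int)) q => g.modify q.1 [] (fun l => l ++ [q.2]))
      PySem.Dict.empty := by rw [List.foldl_map]
  rw [hswap, PySem.Dict.getD_foldl_modify_append]
  simp [pvIdxs, List.filter_map, List.map_map, Function.comp_def]

theorem pvGroups_keys (numbers : List Int) :
    ((PySem.List.enumerate numbers).foldl
      (fun (g : PySem.Dict Int (List Int)) p => g.modify p.2 [] (fun l => l ++ [p.1]))
      PySem.Dict.empty).keys = PySem.Set.ofList numbers := by
  rw [PySem.Dict.keys_foldl_modify_key]
  rw [PySem.List.map_snd_enumerate]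
  simp only [PySem.Dict.keys_empty]
  exact PySem.Set.update_empty numbers

-- ===== VERDICT (by name: the statement is the Claim_ definition above) =====
theorem solve_spec : Claim_equal_solve := by
  intro N numbers _
  show solve N numbers = solve_alt N numbers
  simp only [solve, solve_alt]
  split_ifs with hguard
  · rfl
  · rw [pvDict_eq_loopF]
    have hzero : ∀ v, ((PySem.Set.ofList numbers).foldl
        (fun (d : PySem.Dict Int Int) v => d.insert v 0) PySem.Dict.empty).getD v 0 = 0 :=
      pvInitDict_getD _ _ (fun v => by simp)
    rw [show (fun v => ((PySem.Set.ofList numbers).foldl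
        (fun (d : PySem.Dict Int Int) v => d.insert v 0) PySem.Dict.empty).getD v 0)
        = fun _ : Int => (0 : Int) from funext hzero]
    rw [pvLoopF_eq_sum, PySem.List.map_snd_enumerate]
    have hkeys := pvGroups_keys numbers
    have hnodup : ((PySem.List.enumerate numbers).foldl
        (fun (g : PySem.Dict Int (List Int)) p => g.modify p.2 [] (fun l => l ++ [p.1]))
        PySem.Dict.empty).keys.Nodup := by
      rw [hkeys]; exact PySem.Set.nodup_ofList numbers
    rw [PySem.Dict.values_eq_map_keys _ hnodup [], List.foldl_map, hkeys]
    have hfun : (fun (tot : Int) (k : Int) =>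
        (List.foldl (fun (s : Int × Int) i => (s.1 + s.2 * (N - i), s.2 + (i + 1))) (tot, 0)
          (((PySem.List.enumerate numbers).foldl
            (fun (g : PySem.Dict Int (List Int)) p => g.modify p.2 [] (fun l => l ++ [p.1]))
            PySem.Dict.empty).getD k [])).1)
        = fun (tot : Int) (k : Int) => tot + pvInner N 0 (pvIdxs k (PySem.List.enumerate numbers)) := by
      funext tot k
      rw [show (fun (s : Int × Int) (i : Int) => (s.1 + s.2 * (N - i), s.2 + (i + 1))) = pvStep N from rfl]
      rw [pvStep_fst_offset, pvGroups_getD]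
      rfl
    rw [hfun, PySem.List.foldl_add, zero_add, zero_add]
    have htf : (PySem.Set.ofList numbers).toFinset = numbers.toFinset := by
      apply Finset.ext
      intro a
      simp [List.mem_toFinset, PySem.Set.mem_ofList]
    rw [← List.sum_toFinset _ (PySem.Set.nodup_ofList numbers), htf]
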